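-- pv_equiv track=rewrite | github.com/lol-m-Devil/Reliability_Analysis_ADS | theo_rel.py | generate_arrays
-- ===== SOURCE A (Python) =====
-- def generate_arrays(L):
--     if not L:
--         return [[]]
--
--     results = []
--     smaller_arrays = generate_arrays(L[1:])
--     for i in range(L[0] + 1):
--         for smaller_array in smaller_arrays:
--             results.append([i] + smaller_array)
--     return results
-- ===== SOURCE B (Python) =====
-- def _decode(k, L):
--     # mixed-radix digits of k with radices (b+1 for b in L), most significant first
--     digits = []
--     for b in reversed(L):
--         k, d = divmod(k, b + 1)
--         digits.append(d)
--     digits.reverse()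
--     return digits
--
--
-- def generate_arrays(L):
--     if any(b < 0 for b in L):
--         return []
--     total = 1
--     for b in L:
--         total *= b + 1
--     return [_decode(k, L) for k in range(total)]
-- ===== Notes on version B (the rewrite author's own statement) =====
-- stated objective: alternative
-- what changed: Replaces A's recursive cartesian-product construction with direct mixed-radix decoding: compute total = prod(L[i]+1) and emit, for each k in range(total), the digit vector of k, instead of recursing on the tail and prepending each head index.
import Mathlib
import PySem

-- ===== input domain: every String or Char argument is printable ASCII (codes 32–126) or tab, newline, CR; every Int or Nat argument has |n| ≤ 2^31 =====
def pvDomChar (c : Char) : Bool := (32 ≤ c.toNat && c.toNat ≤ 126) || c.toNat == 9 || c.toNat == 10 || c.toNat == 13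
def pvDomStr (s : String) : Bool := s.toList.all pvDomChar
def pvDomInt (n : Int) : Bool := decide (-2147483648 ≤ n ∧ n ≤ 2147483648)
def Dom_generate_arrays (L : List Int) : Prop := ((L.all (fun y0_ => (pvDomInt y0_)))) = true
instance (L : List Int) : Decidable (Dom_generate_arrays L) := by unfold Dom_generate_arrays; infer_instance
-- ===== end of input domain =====

-- B replaces A's recursive cartesian-product construction by direct mixed-radix
-- decoding of each index k in range(prod(L[i]+1)); objective: alternative algorithm.


-- ===== PORT A =====
def generate_arrays : List Int → List (List Int)
  | [] => [[]]
  | b :: rest =>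
    let smaller := generate_arrays rest
    (PySem.List.pyRange 0 (b + 1) 1).foldl
      (fun res i => smaller.foldl (fun res s => res ++ [i :: s]) res) []

-- ===== PORT B =====
-- digits appended least-significant first while consuming the reversed bound list
def garDecodeRev : List Int → Int → List Int
  | [], _ => []
  | b :: rest, k => PySem.Int.mod k (b + 1) :: garDecodeRev rest (PySem.Int.floordiv k (b + 1))

def garDecode (k : Int) (L : List Int) : List Int := (garDecodeRev L.reverse k).reverse

def generate_arrays_alt (L : List Int) : List (List Int) :=
  if L.any (fun b => decide (b < 0)) then []
  else
    let total := L.foldl (fun t b => t * (b + 1)) 1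
    (PySem.List.pyRange 0 total 1).map (fun k => garDecode k L)

-- ===== PRECONDITION & SPEC =====
def Spec_generate_arrays (L : List Int) (out : List (List Int)) : Prop := out = generate_arrays_alt L
instance (L : List Int) (out : List (List Int)) : Decidable (Spec_generate_arrays L out) := by unfold Spec_generate_arrays; infer_instance

-- ===== CLAIM (what is proved, stated in full; the proofs are below) =====
def Claim_equal_generate_arrays : Prop := ∀ (L : List Int), Dom_generate_arrays L → Spec_generate_arrays L (generate_arrays L)

-- ===== LEMMAS AND PROOFS =====

/-- product of the radices `b+1`. -/
def garProd (L : List Int) : Int := (L.map (· + 1)).prod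

theorem garProd_nil : garProd [] = 1 := rfl
theorem garProd_cons (b : Int) (rest : List Int) :
    garProd (b :: rest) = (b + 1) * garProd rest := by
  simp [garProd]

theorem garProd_pos {L : List Int} (h : ∀ b ∈ L, 0 ≤ b) : 0 < garProd L := by
  induction L with
  | nil => simp [garProd]
  | cons b rest ih =>
    rw [garProd_cons]
    have hb := h b (by simp)
    have := ih (fun x hx => h x (by simp [hx]))
    positivity

theorem garProd_reverse (L : List Int) : garProd L.reverse = garProd L := by
  rw [garProd, garProd, List.map_reverse, List.prod_reverse]

theorem foldl_total (L : List Int) (t : Int) :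
    L.foldl (fun t b => t * (b + 1)) t = t * garProd L := by
  induction L generalizing t with
  | nil => simp [garProd]
  | cons b rest ih => rw [List.foldl_cons, ih, garProd_cons]; ring

/-- A returns [] as soon as some bound is negative. -/
theorem genA_neg {L : List Int} (h : ∃ b ∈ L, b < 0) : generate_arrays L = [] := by
  induction L with
  | nil => simp at h
  | cons b rest ih =>
    rcases h with ⟨x, hx, hxneg⟩
    rcases List.mem_cons.mp hx with rfl | hx
    · rw [generate_arrays, PySem.List.pyRange_one_eq_nil (by omega)]
      simp
    · rw [generate_arrays]
      have hr : generate_arrays rest = [] := ih ⟨x, hx, hxneg⟩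
      simp only [hr]
      have : ∀ (l : List Int) (acc : List (List Int)),
          l.foldl (fun res (i : Int) => ([] : List (List Int)).foldl
            (fun res s => res ++ [i :: s]) res) acc = acc := by
        intro l acc
        induction l generalizing acc with
        | nil => rfl
        | cons y ys ih2 => simp only [List.foldl_cons, List.foldl_nil]; exact ih2 acc
      exact this _ []

/-- A's loop body, in flatMap form. -/
theorem genA_cons (b : Int) (rest : List Int) :
    generate_arrays (b :: rest) =
      (PySem.List.pyRange 0 (b + 1) 1).flatMap
        (fun i => (generate_arrays rest).map (fun s => i :: s)) := by
  rw [generate_arrays]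
  generalize generate_arrays rest = smaller
  have inner : ∀ (i : Int) (res : List (List Int)),
      smaller.foldl (fun res s => res ++ [i :: s]) res = res ++ smaller.map (fun s => i :: s) := by
    intro i res
    induction smaller generalizing res with
    | nil => simp
    | cons s ss ih => simp [ih]
  have outer : ∀ (acc : List (List Int)) (l : List Int),
      l.foldl (fun res i => smaller.foldl (fun res s => res ++ [i :: s]) res) acc =
        acc ++ l.flatMap (fun i => smaller.map (fun s => i :: s)) := by
    intro acc l
    induction l generalizing acc with
    | nil => simp
    | cons i is ih => simp [inner, List.flatMap]
  simpa using outer [] _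

theorem garDecodeRev_append {xs : List Int} (ys : List Int) {k : Int}
    (hxs : ∀ b ∈ xs, 0 ≤ b) (hk : 0 ≤ k) :
    garDecodeRev (xs ++ ys) k = garDecodeRev xs k ++ garDecodeRev ys (k / garProd xs) := by
  induction xs generalizing k with
  | nil => simp [garDecodeRev, garProd]
  | cons x xs ih =>
    have hx : (0:Int) < x + 1 := by have := hxs x (by simp); omega
    rw [List.cons_append, garDecodeRev, garDecodeRev,
      ih (fun b hb => hxs b (by simp [hb])) (by
        rw [PySem.Int.floordiv_eq_ediv_of_pos hx]; exact Int.ediv_nonneg hk (le_of_lt hx)),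
      PySem.Int.floordiv_eq_ediv_of_pos hx, garProd_cons, List.cons_append]
    congr 2
    rw [Int.ediv_ediv_of_nonneg (le_of_lt hx)]

theorem garDecodeRev_add_mul {xs : List Int} {k j : Int}
    (hxs : ∀ b ∈ xs, 0 ≤ b) (hk : 0 ≤ k) (hj : 0 ≤ j) :
    garDecodeRev xs (k + j * garProd xs) = garDecodeRev xs k := by
  induction xs generalizing k j with
  | nil => simp [garDecodeRev]
  | cons x xs ih =>
    have hx : (0:Int) < x + 1 := by have := hxs x (by simp); omega
    rw [garDecodeRev, garDecodeRev, garProd_cons]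
    have harg : k + j * ((x + 1) * garProd xs) = k + (x + 1) * (j * garProd xs) := by ring
    have harg' : k + j * ((x + 1) * garProd xs) = k + (j * garProd xs) * (x + 1) := by ring
    congr 1
    · rw [PySem.Int.mod_eq_emod_of_pos hx, PySem.Int.mod_eq_emod_of_pos hx, harg,
        Int.add_mul_emod_self_left]
    · rw [PySem.Int.floordiv_eq_ediv_of_pos hx, PySem.Int.floordiv_eq_ediv_of_pos hx, harg',
        Int.add_mul_ediv_right _ _ (by omega : x + 1 ≠ 0)]
      exact ih (fun b hb => hxs b (by simp [hb])) (Int.ediv_nonneg hk (le_of_lt hx)) hj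

/-- decoding `j * M + r` for a cons list: head digit `j`, tail digits decode `r`. -/
theorem garDecode_block {b : Int} {rest : List Int} {j r : Int}
    (hb : 0 ≤ b) (hrest : ∀ x ∈ rest, 0 ≤ x)
    (hj0 : 0 ≤ j) (hjb : j ≤ b) (hr0 : 0 ≤ r) (hrM : r < garProd rest) :
    garDecode (j * garProd rest + r) (b :: rest) = j :: garDecode r rest := by
  have hM : 0 < garProd rest := garProd_pos hrest
  have hrev : ∀ x ∈ rest.reverse, 0 ≤ x := fun x hx => hrest x (List.mem_reverse.mp hx)
  have hk : 0 ≤ j * garProd rest + r := by positivity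
  unfold garDecode
  rw [show (b :: rest).reverse = rest.reverse ++ [b] by simp,
    garDecodeRev_append [b] hrev hk]
  have hMrev : garProd rest.reverse = garProd rest := garProd_reverse rest
  have hdigits : garDecodeRev rest.reverse (j * garProd rest + r) = garDecodeRev rest.reverse r := by
    rw [show j * garProd rest + r = r + j * garProd rest.reverse by rw [hMrev]; ring]
    exact garDecodeRev_add_mul hrev hr0 hj0
  have hq : (j * garProd rest + r) / garProd rest.reverse = j := by
    rw [hMrev, add_comm, Int.add_mul_ediv_right _ _ (by omega : garProd rest ≠ 0),
      Int.ediv_eq_zero_of_lt hr0 hrM, zero_add]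
  rw [hdigits, hq]
  have hjb1 : garDecodeRev [b] j = [j] := by
    rw [garDecodeRev, garDecodeRev,
      PySem.Int.mod_eq_emod_of_pos (show (0:Int) < b + 1 by omega),
      Int.emod_eq_of_lt hj0 (show j < b + 1 by omega)]
  rw [hjb1]
  simp

/-- splitting `range (i*M)` into `i` blocks of length `M`. -/
theorem map_range_mul {M : Int} (hM : 0 < M) (f : Int → List Int) :
    ∀ i : Int, 0 ≤ i →
      (PySem.List.pyRange 0 (i * M) 1).map f =
        (PySem.List.pyRange 0 i 1).flatMap
          (fun j => (PySem.List.pyRange 0 M 1).map (fun r => f (j * M + r))) := by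
  intro i hi
  induction i, hi using Int.le_induction with
  | base => simp [PySem.List.pyRange_one_eq_nil (by omega : (0:Int) ≤ 0)]
  | succ i hi ih =>
    have h1 : (0:Int) ≤ i * M := by positivity
    have h2 : i * M ≤ (i + 1) * M := by nlinarith
    rw [PySem.List.pyRange_one_append 0 (i * M) ((i + 1) * M) h1 h2, List.map_append, ih,
      PySem.List.pyRange_one_succ_right hi, List.flatMap_append]
    congr 1
    rw [List.flatMap_cons, List.flatMap_nil, List.append_nil]
    rw [PySem.List.pyRange_one (i * M) ((i + 1) * M), PySem.List.pyRange_one 0 M,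
      List.map_map, List.map_map]
    have h3 : (i + 1) * M - i * M = M := by ring
    rw [h3, sub_zero]
    apply List.map_congr_left
    intro k _
    simp [Function.comp]

/-- main: on nonnegative bounds A's output is the decoded index list. -/
theorem genA_decode {L : List Int} (h : ∀ b ∈ L, 0 ≤ b) :
    generate_arrays L = (PySem.List.pyRange 0 (garProd L) 1).map (fun k => garDecode k L) := by
  induction L with
  | nil =>
    rw [garProd_nil, show PySem.List.pyRange 0 1 1 = [0] from PySem.List.pyRange_one_singleton 0]
    rfl
  | cons b rest ih =>
    have hb : 0 ≤ b := h b (by simp)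
    have hrest : ∀ x ∈ rest, 0 ≤ x := fun x hx => h x (by simp [hx])
    have hM : 0 < garProd rest := garProd_pos hrest
    rw [genA_cons, ih hrest, garProd_cons,
      map_range_mul hM (fun k => garDecode k (b :: rest)) (b + 1) (by omega)]
    apply List.flatMap_congr
    intro j hj
    have hj' := (PySem.List.mem_pyRange_one).mp hj
    rw [List.map_map]
    apply List.map_congr_left
    intro r hr
    have hr' := (PySem.List.mem_pyRange_one).mp hr
    simp only [Function.comp]
    exact (garDecode_block hb hrest hj'.1 (by omega) hr'.1 hr'.2).symm

-- ===== VERDICT (by name: the statement is the Claim_ definition above) =====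
theorem generate_arrays_spec : Claim_equal_generate_arrays := by
  intro L _
  unfold Spec_generate_arrays generate_arrays_alt
  by_cases hneg : ∃ b ∈ L, b < 0
  · rw [if_pos (by simpa [List.any_eq_true] using hneg), genA_neg hneg]
  · have h : ∀ b ∈ L, 0 ≤ b := fun b hb => le_of_not_gt fun hlt => hneg ⟨b, hb, hlt⟩
    rw [if_neg (by simp [List.any_eq_true]; intro x hx; exact h x hx)]
    simp only [foldl_total L 1, one_mul]
    exact genA_decode h
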